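-- pv_equiv track=rewrite | github.com/metehanboy/epint | src/epint/models/request_model.py | _categorize_parameters
-- ===== SOURCE A (Python) =====
-- from typing import Dict, Any, List, Optional, Callable
--
-- def _categorize_parameters(parameters: List[Dict[str, Any]]) -> Dict[str, List[Dict[str, Any]]]:
--     """Parametreleri tipine göre kategorize et"""
--     categorized = {
--         'body': [],
--         'query': [],
--         'header': [],
--         'path': []
--     }
--
--     for param in parameters:
--         param_in = param.get('in', '')
--         if param_in in categorized:
--             categorized[param_in].append(param)
--
--     return categorized
-- ===== SOURCE B (Python) =====
-- from typing import Dict, Any, List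
--
-- def _categorize_parameters(parameters: List[Dict[str, Any]]) -> Dict[str, List[Dict[str, Any]]]:
--     """Parametreleri tipine göre kategorize et (filter per category)"""
--     return {cat: [p for p in parameters if p.get('in', '') == cat]
--             for cat in ('body', 'query', 'header', 'path')}
-- ===== Notes on version B (the rewrite author's own statement) =====
-- stated objective: alternative
-- what changed: Replaces the single-pass dispatch loop that appends each param into a pre-built dict of buckets with a dict comprehension that filters the parameter list once per fixed category (four independent scans).
import Mathlib
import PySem

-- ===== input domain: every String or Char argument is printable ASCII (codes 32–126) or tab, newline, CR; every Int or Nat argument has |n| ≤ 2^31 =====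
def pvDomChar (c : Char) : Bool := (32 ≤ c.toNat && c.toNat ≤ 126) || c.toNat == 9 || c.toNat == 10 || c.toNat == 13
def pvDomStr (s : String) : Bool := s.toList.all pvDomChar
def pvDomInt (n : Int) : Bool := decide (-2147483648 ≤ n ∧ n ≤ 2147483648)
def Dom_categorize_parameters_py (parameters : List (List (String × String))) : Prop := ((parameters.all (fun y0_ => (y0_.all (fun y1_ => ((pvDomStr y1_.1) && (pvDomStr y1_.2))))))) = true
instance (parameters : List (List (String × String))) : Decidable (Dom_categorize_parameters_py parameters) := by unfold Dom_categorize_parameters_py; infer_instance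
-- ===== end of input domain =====

-- B changes the decomposition: four per-category filters instead of A's single dispatch loop; same cost class.

-- ===== PORT A =====
-- param.get('in', '') on the parameter dict (first-match assoc lookup)
def pvParamIn (param : List (String × String)) : String :=
  (PySem.Dict.mk param).getD "in" ""

-- the body of A's for-loop: route param into its bucket if its 'in' field is a key
def pvStep (cat : PySem.Dict String (List (List (String × String))))
    (param : List (String × String)) : PySem.Dict String (List (List (String × String))) :=
  let param_in := pvParamIn param
  if cat.contains param_in then cat.modify param_in [] (fun l => l ++ [param]) else cat

def categorize_parameters_py (parameters : List (List (String × String))) : List (String × List (List (String × String))) :=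
  let categorized : PySem.Dict String (List (List (String × String))) :=
    PySem.Dict.mk [("body", []), ("query", []), ("header", []), ("path", [])]
  (parameters.foldl pvStep categorized).items

-- ===== PORT B =====
def categorize_parameters_py_alt (parameters : List (List (String × String))) : List (String × List (List (String × String))) :=
  ["body", "query", "header", "path"].map
    (fun cat => (cat, parameters.filter (fun p => pvParamIn p == cat)))

-- ===== PRECONDITION & SPEC =====
def Spec_categorize_parameters_py (parameters : List (List (String × String))) (out : List (String × List (List (String × String)))) : Prop := out = categorize_parameters_py_alt parameters
instance (parameters : List (List (String × String))) (out : List (String × List (List (String × String)))) : Decidable (Spec_categorize_parameters_py parameters out) := by unfold Spec_categorize_parameters_py; infer_instance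

-- ===== CLAIM (what is proved, stated in full; the proofs are below) =====
def Claim_equal_categorize_parameters_py : Prop := ∀ (parameters : List (List (String × String))), Dom_categorize_parameters_py parameters → Spec_categorize_parameters_py parameters (categorize_parameters_py parameters)

-- ===== LEMMAS AND PROOFS =====

-- one loop step on the four-bucket literal dict
theorem pv_step_eq (p : List (String × String)) (b q h pa : List (List (String × String))) :
    pvStep (PySem.Dict.mk [("body", b), ("query", q), ("header", h), ("path", pa)]) p
    = PySem.Dict.mk
        [("body", if pvParamIn p = "body" then b ++ [p] else b),
         ("query", if pvParamIn p = "query" then q ++ [p] else q),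
         ("header", if pvParamIn p = "header" then h ++ [p] else h),
         ("path", if pvParamIn p = "path" then pa ++ [p] else pa)] := by
  by_cases hb : pvParamIn p = "body"
  · simp [pvStep, hb, PySem.Dict.contains, PySem.Dict.modify, PySem.Dict.insert,
      PySem.Dict.get?, PySem.Dict.getD]
  · by_cases hq : pvParamIn p = "query"
    · simp [pvStep, hq, PySem.Dict.contains, PySem.Dict.modify, PySem.Dict.insert,
        PySem.Dict.get?, PySem.Dict.getD]
    · by_cases hh : pvParamIn p = "header"
      · simp [pvStep, hh, PySem.Dict.contains, PySem.Dict.modify, PySem.Dict.insert,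
          PySem.Dict.get?, PySem.Dict.getD]
      · by_cases hp : pvParamIn p = "path"
        · simp [pvStep, hp, PySem.Dict.contains, PySem.Dict.modify, PySem.Dict.insert,
            PySem.Dict.get?, PySem.Dict.getD]
        · simp [pvStep, PySem.Dict.contains, hb, hq, hh, hp,
            Ne.symm hb, Ne.symm hq, Ne.symm hh, Ne.symm hp]

-- loop invariant: folding A's dispatch step over ps onto the four-bucket literal dict
-- appends, per bucket, exactly the params whose 'in' field equals that bucket's key
theorem pv_fold_inv (ps : List (List (String × String)))
    (b q h pa : List (List (String × String))) :
    (ps.foldl pvStep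
      (PySem.Dict.mk [("body", b), ("query", q), ("header", h), ("path", pa)])).items
    = [("body", b ++ ps.filter (fun p => pvParamIn p == "body")),
       ("query", q ++ ps.filter (fun p => pvParamIn p == "query")),
       ("header", h ++ ps.filter (fun p => pvParamIn p == "header")),
       ("path", pa ++ ps.filter (fun p => pvParamIn p == "path"))] := by
  induction ps generalizing b q h pa with
  | nil => simp
  | cons p rest ih =>
    rw [List.foldl_cons, pv_step_eq, ih]
    simp only [List.filter_cons]
    split_ifs with hb hq hh hp <;> simp_all

-- ===== VERDICT (by name: the statement is the Claim_ definition above) =====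
theorem categorize_parameters_py_spec : Claim_equal_categorize_parameters_py := by
  intro parameters _
  unfold Spec_categorize_parameters_py categorize_parameters_py categorize_parameters_py_alt
  simp [pv_fold_inv]
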